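-- pv_equiv track=rewrite | github.com/VII-77/Levqor-9.0 | enterprise/rbac.py | get_role_permissions
-- ===== SOURCE A (Python) =====
-- from typing import Optional, Dict, Set
--
-- ROLES = {
--     "owner": "Full administrative access",
--     "admin": "Administrative access to most features",
--     "editor": "Can create and edit workflows",
--     "viewer": "Read-only access"
-- }
--
-- PERMISSIONS: Dict[str, Set[str]] = {
--     "manage_users": {"owner", "admin"},
--     "manage_roles": {"owner"},
--     "view_billing": {"owner"},
--     "manage_billing": {"owner"},
--     "manage_workflows": {"owner", "admin", "editor"},
--     "view_workflows": {"owner", "admin", "editor", "viewer"},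
--     "manage_ai": {"owner", "admin", "editor"},
--     "view_ai_logs": {"owner", "admin"},
--     "view_security_logs": {"owner", "admin"},
--     "view_enterprise_dashboard": {"owner", "admin"},
--     "manage_api_keys": {"owner", "admin"},
--     "view_metrics": {"owner", "admin", "editor", "viewer"},
-- }
--
-- def get_role_permissions(role: str) -> Set[str]:
--     """
--     Get all permissions for a given role.
--
--     Args:
--         role: Role name (e.g. 'admin')
--
--     Returns:
--         Set of permission strings
--     """
--     if role not in ROLES:
--         return set()
--
--     permissions = set()
--     for perm, allowed_roles in PERMISSIONS.items():
--         if role in allowed_roles: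
--             permissions.add(perm)
--
--     return permissions
-- ===== SOURCE B (Python) =====
-- ROLE_PERMISSIONS = {
--     "owner": {"manage_users", "manage_roles", "view_billing", "manage_billing",
--               "manage_workflows", "view_workflows", "manage_ai", "view_ai_logs",
--               "view_security_logs", "view_enterprise_dashboard", "manage_api_keys",
--               "view_metrics"},
--     "admin": {"manage_users", "manage_workflows", "view_workflows", "manage_ai",
--               "view_ai_logs", "view_security_logs", "view_enterprise_dashboard",
--               "manage_api_keys", "view_metrics"},
--     "editor": {"manage_workflows", "view_workflows", "manage_ai", "view_metrics"},
--     "viewer": {"view_workflows", "view_metrics"},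
-- }
--
-- def get_role_permissions(role: str):
--     return set(ROLE_PERMISSIONS.get(role, set()))
-- ===== Notes on version B (the rewrite author's own statement) =====
-- stated objective: simpler
-- what changed: Replaces the per-call scan over PERMISSIONS testing role membership with a single lookup in a precomputed inverted index ROLE_PERMISSIONS (role -> permission set), returned as a fresh copy.
import Mathlib
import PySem

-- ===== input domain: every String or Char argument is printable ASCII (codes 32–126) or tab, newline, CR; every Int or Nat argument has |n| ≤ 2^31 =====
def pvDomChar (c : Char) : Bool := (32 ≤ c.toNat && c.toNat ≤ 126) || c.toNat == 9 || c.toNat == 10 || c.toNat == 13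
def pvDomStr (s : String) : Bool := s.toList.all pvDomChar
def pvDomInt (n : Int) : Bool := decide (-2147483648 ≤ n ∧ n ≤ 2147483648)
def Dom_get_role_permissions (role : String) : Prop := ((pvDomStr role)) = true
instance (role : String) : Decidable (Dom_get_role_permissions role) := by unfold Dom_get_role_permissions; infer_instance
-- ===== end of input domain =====

-- B replaces A's per-call scan over PERMISSIONS with one lookup in a precomputed
-- inverted index ROLE_PERMISSIONS (simpler); return value only (fresh sets either way).

-- ===== PORT A =====
def pvROLES : PySem.Dict String String := PySem.Dict.mk [
  ("owner", "Full administrative access"),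
  ("admin", "Administrative access to most features"),
  ("editor", "Can create and edit workflows"),
  ("viewer", "Read-only access")]

def pvPERMISSIONS : List (String × List String) := [
  ("manage_users", ["owner", "admin"]),
  ("manage_roles", ["owner"]),
  ("view_billing", ["owner"]),
  ("manage_billing", ["owner"]),
  ("manage_workflows", ["owner", "admin", "editor"]),
  ("view_workflows", ["owner", "admin", "editor", "viewer"]),
  ("manage_ai", ["owner", "admin", "editor"]),
  ("view_ai_logs", ["owner", "admin"]),
  ("view_security_logs", ["owner", "admin"]),
  ("view_enterprise_dashboard", ["owner", "admin"]),
  ("manage_api_keys", ["owner", "admin"]),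
  ("view_metrics", ["owner", "admin", "editor", "viewer"])]

def get_role_permissions (role : String) : List String :=
  if ¬ pvROLES.contains role then []
  else
    pvPERMISSIONS.foldl
      (fun permissions pr =>
        if pr.2.contains role then PySem.Set.add permissions pr.1 else permissions)
      ([] : List String)

-- ===== PORT B =====
def pvROLE_PERMISSIONS : PySem.Dict String (List String) := PySem.Dict.mk [
  ("owner", ["manage_users", "manage_roles", "view_billing", "manage_billing", "manage_workflows", "view_workflows", "manage_ai", "view_ai_logs", "view_security_logs", "view_enterprise_dashboard", "manage_api_keys", "view_metrics"]),
  ("admin", ["manage_users", "manage_workflows", "view_workflows", "manage_ai", "view_ai_logs", "view_security_logs", "view_enterprise_dashboard", "manage_api_keys", "view_metrics"]),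
  ("editor", ["manage_workflows", "view_workflows", "manage_ai", "view_metrics"]),
  ("viewer", ["view_workflows", "view_metrics"])]

def get_role_permissions_alt (role : String) : List String :=
  PySem.Set.ofList (pvROLE_PERMISSIONS.getD role [])

-- ===== PRECONDITION & SPEC =====
def Spec_get_role_permissions (role : String) (out : List String) : Prop := out = get_role_permissions_alt role
instance (role : String) (out : List String) : Decidable (Spec_get_role_permissions role out) := by unfold Spec_get_role_permissions; infer_instance

-- ===== CLAIM (what is proved, stated in full; the proofs are below) =====
def Claim_equal_get_role_permissions : Prop := ∀ (role : String), Dom_get_role_permissions role → Spec_get_role_permissions role (get_role_permissions role)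

-- ===== LEMMAS AND PROOFS =====

-- ===== VERDICT (by name: the statement is the Claim_ definition above) =====
theorem get_role_permissions_spec : Claim_equal_get_role_permissions := by
  intro role _
  unfold Spec_get_role_permissions
  by_cases h1 : role = "owner"; · subst h1; decide
  by_cases h2 : role = "admin"; · subst h2; decide
  by_cases h3 : role = "editor"; · subst h3; decide
  by_cases h4 : role = "viewer"; · subst h4; decide
  simp [get_role_permissions, get_role_permissions_alt, pvROLES, pvROLE_PERMISSIONS,
        PySem.Dict.getD, PySem.Dict.get?, PySem.Dict.contains, PySem.Set.ofList,
        Ne.symm h1, Ne.symm h2, Ne.symm h3, Ne.symm h4]
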